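-- pv_equiv track=rewrite | github.com/UCSF-DataSci/05-first-exam-hojess20 | bioinformatics_project/scripts/find_cutsites.py | find_cut_site_pairs
-- ===== SOURCE A (Python) =====
-- def find_cut_site_pairs(cut_locations, min_distance=80000, max_distance=120000):
--     pairs = []
--     total_locations = len(cut_locations)
--     for i in range(total_locations):
--         for j in range(i + 1, total_locations):
--             distance = cut_locations[j] - cut_locations[i]
--             if min_distance <= distance <= max_distance:
--                 pairs.append((cut_locations[i], cut_locations[j]))
--     return pairs
-- ===== SOURCE B (Python) =====
-- def find_cut_site_pairs(cut_locations, min_distance=80000, max_distance=120000):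
--     # Walk the suffixes of the list: pair the current head with its remaining
--     # tail via a comprehension, instead of A's double index loop.
--     pairs = []
--     rest = list(cut_locations)
--     while rest:
--         x = rest.pop(0)
--         pairs += [(x, y) for y in rest
--                   if min_distance <= y - x <= max_distance]
--     return pairs
-- ===== Notes on version B (the rewrite author's own statement) =====
-- stated objective: simpler
-- what changed: Replaces A's nested index loops (range(n) x range(i+1,n) with explicit indexing) by a single loop over the suffixes of the list that pops the head and pairs it with the remaining tail via one comprehension, with no index arithmetic.
import Mathlib
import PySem

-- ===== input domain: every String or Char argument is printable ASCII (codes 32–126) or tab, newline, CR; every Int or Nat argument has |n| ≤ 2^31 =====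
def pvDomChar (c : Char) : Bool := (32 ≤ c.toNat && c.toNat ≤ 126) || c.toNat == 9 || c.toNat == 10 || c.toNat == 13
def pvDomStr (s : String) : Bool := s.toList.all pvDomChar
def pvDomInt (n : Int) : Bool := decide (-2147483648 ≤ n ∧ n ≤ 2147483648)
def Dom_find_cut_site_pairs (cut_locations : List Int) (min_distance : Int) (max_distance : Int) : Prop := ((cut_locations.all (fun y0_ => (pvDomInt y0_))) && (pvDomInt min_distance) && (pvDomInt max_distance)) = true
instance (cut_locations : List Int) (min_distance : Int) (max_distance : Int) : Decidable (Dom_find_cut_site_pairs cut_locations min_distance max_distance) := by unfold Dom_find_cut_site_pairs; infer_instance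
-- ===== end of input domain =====

-- B replaces A's nested index loops by one loop over the suffixes of the list,
-- pairing each head with its tail by a comprehension (simpler; no indexing).

-- ===== PORT A =====
def find_cut_site_pairs (cut_locations : List Int) (min_distance : Int) (max_distance : Int) : List (Int × Int) :=
  let total_locations : Int := cut_locations.length
  (PySem.List.pyRange 0 total_locations 1).foldl (fun pairs i =>
    (PySem.List.pyRange (i + 1) total_locations 1).foldl (fun pairs j =>
      let distance := PySem.List.pyGetD cut_locations j 0 - PySem.List.pyGetD cut_locations i 0
      if min_distance ≤ distance ∧ distance ≤ max_distance then
        pairs ++ [(PySem.List.pyGetD cut_locations i 0, PySem.List.pyGetD cut_locations j 0)]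
      else pairs) pairs) []

-- ===== PORT B =====
-- B's while loop over the shrinking suffix 'rest' (pop the head, pair it with the rest)
def pvSuffixLoop (min_distance : Int) (max_distance : Int) : List Int → List (Int × Int)
  | [] => []
  | x :: rest =>
      (rest.filter (fun y => decide (min_distance ≤ y - x ∧ y - x ≤ max_distance))).map (fun y => (x, y))
        ++ pvSuffixLoop min_distance max_distance rest

def find_cut_site_pairs_alt (cut_locations : List Int) (min_distance : Int) (max_distance : Int) : List (Int × Int) :=
  pvSuffixLoop min_distance max_distance cut_locations

-- ===== PRECONDITION & SPEC =====
def Spec_find_cut_site_pairs (cut_locations : List Int) (min_distance : Int) (max_distance : Int) (out : List (Int × Int)) : Prop := out = find_cut_site_pairs_alt cut_locations min_distance max_distance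
instance (cut_locations : List Int) (min_distance : Int) (max_distance : Int) (out : List (Int × Int)) : Decidable (Spec_find_cut_site_pairs cut_locations min_distance max_distance out) := by unfold Spec_find_cut_site_pairs; infer_instance

-- ===== CLAIM (what is proved, stated in full; the proofs are below) =====
def Claim_equal_find_cut_site_pairs : Prop := ∀ (cut_locations : List Int) (min_distance : Int) (max_distance : Int), Dom_find_cut_site_pairs cut_locations min_distance max_distance → Spec_find_cut_site_pairs cut_locations min_distance max_distance (find_cut_site_pairs cut_locations min_distance max_distance)

-- ===== LEMMAS AND PROOFS =====

-- range(n) over Int is the cast of List.range n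
theorem pv_range_cast (n : Nat) : PySem.List.pyRange 0 (n:Int) 1 = List.map (fun k : Nat => (k:Int)) (List.range n) := by
  rw [PySem.List.pyRange_zero_nat]

-- the index-free form of A (chunk per position k) is exactly B's suffix recursion
theorem pv_gen (mn mx : Int) (xs : List Int) :
    (List.range xs.length).flatMap
      (fun k => ((xs.drop (k+1)).filter (fun y => decide (mn ≤ y - xs.getD k 0 ∧ y - xs.getD k 0 ≤ mx))).map
        (fun y => (xs.getD k 0, y))) = pvSuffixLoop mn mx xs := by
  induction xs with
  | nil => simp [pvSuffixLoop]
  | cons x rest ih =>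
    rw [List.length_cons, List.range_succ_eq_map, List.flatMap_cons, List.flatMap_map]
    simp only [List.getD_cons_zero, List.getD_cons_succ, List.drop_succ_cons, List.drop_zero,
      Nat.succ_eq_add_one]
    rw [pvSuffixLoop]
    congr 1

theorem pv_main (mn mx : Int) (xs : List Int) :
    find_cut_site_pairs xs mn mx = pvSuffixLoop mn mx xs := by
  unfold find_cut_site_pairs
  simp only [PySem.List.foldl_append_ite]
  rw [PySem.List.foldl_append_eq_flatMap, List.nil_append, pv_range_cast, List.flatMap_map]
  rw [← pv_gen mn mx xs]
  refine List.flatMap_congr ?_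
  intro k hk
  have hdrop : (PySem.List.pyRange ((k+1:Nat):Int) (xs.length:Int) 1).map (fun j => PySem.List.pyGetD xs j 0) = xs.drop (k+1) := by
    rw [PySem.List.map_pyGetD_pyRange' (a := ((k+1:Nat):Int)) (ha := by positivity)]
    simp
  rw [← hdrop, List.filter_map, List.map_map]
  push_cast
  simp [Function.comp_def]

-- ===== VERDICT (by name: the statement is the Claim_ definition above) =====
theorem find_cut_site_pairs_spec : Claim_equal_find_cut_site_pairs := by
  intro xs mn mx _
  unfold Spec_find_cut_site_pairs find_cut_site_pairs_alt
  exact pv_main mn mx xs
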